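-- pv_equiv track=rewrite | github.com/leonov-av/vulristics | vulristics_code/functions_report_vulnerabilities.py | get_sorted_product_name_list
-- ===== SOURCE A (Python) =====
-- def get_sorted_product_name_list(product_data):
--     value_to_products = dict()
--     for product_name in product_data:
--         if not product_data[product_name]['value'] in value_to_products:
--             value_to_products[product_data[product_name]['value']] = list()
--         value_to_products[product_data[product_name]['value']].append(product_name)
--     values = list(value_to_products.keys())
--     product_names = list()
--     values.sort(reverse=True)
--     for value in values:
--         value_to_products[value].sort()
--         for product_name in value_to_products[value]:
--             product_names.append(product_name)
--     return product_names
-- ===== SOURCE B (Python) =====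
-- def get_sorted_product_name_list(product_data):
--     product_names = sorted(product_data)
--     product_names.sort(key=lambda p: product_data[p]['value'], reverse=True)
--     return product_names
-- ===== Notes on version B (the rewrite author's own statement) =====
-- stated objective: simpler
-- what changed: Replaced A's value-to-names grouping dict, descending key sort and grouped concatenation by a stable two-pass sort of the product names (ascending by name, then stable-descending by value).
import Mathlib
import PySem

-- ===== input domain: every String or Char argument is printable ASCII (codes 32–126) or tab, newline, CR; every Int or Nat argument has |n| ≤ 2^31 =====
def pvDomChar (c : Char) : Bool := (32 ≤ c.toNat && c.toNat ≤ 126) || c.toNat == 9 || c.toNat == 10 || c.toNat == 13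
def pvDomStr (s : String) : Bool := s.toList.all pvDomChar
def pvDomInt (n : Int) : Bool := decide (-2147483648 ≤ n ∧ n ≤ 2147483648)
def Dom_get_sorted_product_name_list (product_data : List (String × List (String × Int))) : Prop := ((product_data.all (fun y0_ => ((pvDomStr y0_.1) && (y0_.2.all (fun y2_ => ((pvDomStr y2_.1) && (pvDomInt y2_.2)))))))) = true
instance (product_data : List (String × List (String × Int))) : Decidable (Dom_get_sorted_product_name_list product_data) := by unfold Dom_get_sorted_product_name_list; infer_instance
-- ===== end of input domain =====

-- B replaces A's value→names grouping dict and grouped concatenation by a stable two-pass sort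
-- (names ascending, then values descending); objective: simpler (no intermediate index).

-- ===== PORT A =====
-- shared lookup helper: product_data[name]['value'] (the parameter is a Python dict, so both
-- ports read it through PySem.Dict.ofList; the defaults are never reached under Pre_, where
-- Python would raise KeyError instead)
def pvValue (data : PySem.Dict String (List (String × Int))) (name : String) : Int :=
  (PySem.Dict.ofList (data.getD name [])).getD "value" 0

def get_sorted_product_name_list (product_data : List (String × List (String × Int))) : List String :=
  let data := PySem.Dict.ofList product_data
  let value_to_products : PySem.Dict Int (List String) :=
    data.keys.foldl (fun acc name =>
      let v := pvValue data name
      -- 'if v not in d: d[v] = list()' then 'd[v].append(name)'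
      let acc := if acc.contains v then acc else acc.insert v ([] : List String)
      acc.modify v [] (fun l => l ++ [name])) PySem.Dict.empty
  let values := PySem.List.sorted value_to_products.keys (fun x => x) true
  values.foldl (fun acc v =>
    acc ++ PySem.List.sorted (value_to_products.getD v []) (fun x => x) false) []

-- ===== PORT B =====
def get_sorted_product_name_list_alt (product_data : List (String × List (String × Int))) : List String :=
  let data := PySem.Dict.ofList product_data
  let product_names := PySem.List.sorted data.keys (fun x => x) false
  PySem.List.sorted product_names (fun p => pvValue data p) true

-- ===== PRECONDITION & SPEC =====
-- Pre_ excludes exactly the inputs on which some product's dict lacks a 'value' key: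
-- there the Python A raises KeyError (and the Python B raises KeyError too).
def Pre_get_sorted_product_name_list (product_data : List (String × List (String × Int))) : Prop :=
  ∀ p ∈ (PySem.Dict.ofList product_data).items, (PySem.Dict.ofList p.2).contains "value" = true
instance (product_data : List (String × List (String × Int))) : Decidable (Pre_get_sorted_product_name_list product_data) := by unfold Pre_get_sorted_product_name_list; infer_instance

def pvWitness_get_sorted_product_name_list : (List (String × List (String × Int))) :=
  [("a", [("value", 2)]), ("b", [("value", 1)])]

def Spec_get_sorted_product_name_list (product_data : List (String × List (String × Int))) (out : List String) : Prop := out = get_sorted_product_name_list_alt product_data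
instance (product_data : List (String × List (String × Int))) (out : List String) : Decidable (Spec_get_sorted_product_name_list product_data out) := by unfold Spec_get_sorted_product_name_list; infer_instance

-- ===== CLAIM (what is proved, stated in full; the proofs are below) =====
def Claim_equal_get_sorted_product_name_list : Prop := ∀ (product_data : List (String × List (String × Int))), Dom_get_sorted_product_name_list product_data → Pre_get_sorted_product_name_list product_data → Spec_get_sorted_product_name_list product_data (get_sorted_product_name_list product_data)

-- ===== LEMMAS AND PROOFS =====

-- the total order both programs realise: value descending, then name ascending
def pvOrd (v : String → Int) (a b : String) : Prop := v b < v a ∨ (v a = v b ∧ a < b)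

lemma pvOrd_antisymm (v : String → Int) (a b : String) (h1 : pvOrd v a b) (h2 : pvOrd v b a) : a = b := by
  rcases h1 with h1 | ⟨h1, h1'⟩ <;> rcases h2 with h2 | ⟨h2, h2'⟩ <;>
    first
      | exact absurd h2 (lt_asymm h1)
      | exact absurd h1 (by omega)
      | exact absurd h2 (by omega)
      | exact absurd h2' (lt_asymm h1')

-- the 'if absent insert-empty then modify' step is a single Dict.modify
lemma pvStep_eq_modify (d : PySem.Dict Int (List String)) (v : Int) (f : List String → List String) :
    (if d.contains v then d else d.insert v ([] : List String)).modify v [] f = d.modify v [] f := by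
  by_cases h : d.contains v
  · simp [h]
  · simp only [h, Bool.false_eq_true, ite_false, PySem.Dict.modify,
      PySem.Dict.getD_insert_self, PySem.Dict.insert_insert_self,
      PySem.Dict.getD_of_not_contains _ _ (by simpa using h)]

-- stability of PySem's reverse sort: inserting x after all equal keys
lemma pvInsertBy_pairwise (v : String → Int) (x : String) (acc : List String)
    (h1 : acc.Pairwise (pvOrd v)) (h2 : ∀ y ∈ acc, y < x) :
    (PySem.List.insertBy (fun a b => decide (v b < v a)) x acc).Pairwise (pvOrd v) := by
  induction acc with
  | nil => simp [PySem.List.insertBy, pvOrd]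
  | cons y ys ih =>
    rw [List.pairwise_cons] at h1
    by_cases hb : v y < v x
    · have : PySem.List.insertBy (fun a b => decide (v b < v a)) x (y :: ys) = x :: y :: ys := by
        simp [PySem.List.insertBy, hb]
      rw [this]
      refine List.Pairwise.cons ?_ (List.Pairwise.cons h1.1 h1.2)
      intro z hz
      rcases List.mem_cons.mp hz with rfl | hz
      · exact Or.inl hb
      · rcases h1.1 z hz with h | ⟨h, _⟩
        · exact Or.inl (lt_trans h hb)
        · exact Or.inl (h ▸ hb)
    · have : PySem.List.insertBy (fun a b => decide (v b < v a)) x (y :: ys) =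
          y :: PySem.List.insertBy (fun a b => decide (v b < v a)) x ys := by
        simp [PySem.List.insertBy, hb]
      rw [this]
      refine List.Pairwise.cons ?_ (ih h1.2 (fun z hz => h2 z (List.mem_cons_of_mem _ hz)))
      intro z hz
      rcases (PySem.List.mem_insertBy _ _ _ _).mp hz with rfl | hz
      · rcases lt_or_eq_of_le (not_lt.mp hb) with h | h
        · exact Or.inl h
        · exact Or.inr ⟨h.symm, h2 y (List.mem_cons_self)⟩
      · exact h1.1 z hz

lemma pvFoldl_insertBy_pairwise (v : String → Int) (l acc : List String)
    (h1 : acc.Pairwise (pvOrd v)) (h2 : ∀ y ∈ acc, ∀ x ∈ l, y < x) (h3 : l.Pairwise (· < ·)) :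
    (l.foldl (fun acc x => PySem.List.insertBy (fun a b => decide (v b < v a)) x acc) acc).Pairwise (pvOrd v) := by
  induction l generalizing acc with
  | nil => exact h1
  | cons x xs ih =>
    rw [List.pairwise_cons] at h3
    refine ih _ (pvInsertBy_pairwise v x acc h1 (fun y hy => h2 y hy x (List.mem_cons_self))) ?_ h3.2
    intro y hy z hz
    rcases (PySem.List.mem_insertBy _ _ _ _).mp hy with rfl | hy
    · exact h3.1 z hz
    · exact h2 y hy z (List.mem_cons_of_mem _ hz)

-- the stable reverse sort of a strictly increasing list is pvOrd-sorted
lemma pvSorted_rev_pairwise (v : String → Int) (l : List String) (h : l.Pairwise (· < ·)) :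
    (PySem.List.sorted l v true).Pairwise (pvOrd v) := by
  rw [PySem.List.sorted_rev_eq_foldl_insertBy]
  exact pvFoldl_insertBy_pairwise v l [] (List.Pairwise.nil) (by simp) h

-- concatenating the per-value filters over a covering duplicate-free value list is a permutation
lemma pvPerm_flatMap_filter (vs : List Int) (l : List String) (v : String → Int)
    (hnd : vs.Nodup) (hcov : ∀ x ∈ l, v x ∈ vs) :
    (vs.flatMap (fun w => l.filter (fun x => v x == w))).Perm l := by
  induction vs generalizing l with
  | nil => simp [List.eq_nil_iff_forall_not_mem.mpr (fun x hx => by simpa using hcov x hx)]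
  | cons w vs ih =>
    rw [List.nodup_cons] at hnd
    have hrec : vs.flatMap (fun w' => l.filter (fun x => v x == w')) =
        vs.flatMap (fun w' => (l.filter (fun x => !(v x == w))).filter (fun x => v x == w')) := by
      refine List.flatMap_congr (fun w' hw' => ?_)
      rw [List.filter_filter]
      refine (List.filter_congr (fun x _ => ?_)).symm
      by_cases h : v x = w'
      · have hww : w' ≠ w := fun hc => hnd.1 (hc ▸ hw')
        simp [h, hww]
      · simp [h]
    have hcov' : ∀ x ∈ l.filter (fun x => !(v x == w)), v x ∈ vs := by
      intro x hx
      rw [List.mem_filter] at hx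
      rcases List.mem_cons.mp (hcov x hx.1) with h | h
      · exact absurd (beq_iff_eq.mpr h) (by simpa using hx.2)
      · exact h
    have h1 : (w :: vs).flatMap (fun w' => l.filter (fun x => v x == w')) =
        l.filter (fun x => v x == w) ++ vs.flatMap (fun w' => l.filter (fun x => v x == w')) := by
      simp [List.flatMap_cons]
    rw [h1, hrec]
    exact ((ih _ hnd.2 hcov').append_left _).trans (List.filter_append_perm _ l)

-- pointwise permutation congruence for flatMap
lemma pvPerm_flatMap_congr (vs : List Int) (f g : Int → List String)
    (h : ∀ w ∈ vs, (f w).Perm (g w)) : (vs.flatMap f).Perm (vs.flatMap g) := by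
  induction vs with
  | nil => simp
  | cons w ws ih =>
    simp only [List.flatMap_cons]
    exact (h w (List.mem_cons_self)).append (ih (fun w' hw' => h w' (List.mem_cons_of_mem _ hw')))

-- A's grouping dict, with the step already reduced to a pure Dict.modify fold
def pvGroups (data : PySem.Dict String (List (String × Int))) : PySem.Dict Int (List String) :=
  data.keys.foldl (fun acc name => acc.modify (pvValue data name) [] (fun l => l ++ [name]))
    PySem.Dict.empty

-- the heart of the equivalence, over the normalised dict
lemma pvMain (data : PySem.Dict String (List (String × Int))) (hnd : data.keys.Nodup) :
    (PySem.List.sorted (pvGroups data).keys (fun x => x) true).foldl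
      (fun acc w => acc ++ PySem.List.sorted ((pvGroups data).getD w []) (fun x => x) false) []
    = PySem.List.sorted (PySem.List.sorted data.keys (fun x => x) false) (pvValue data) true := by
  set v : String → Int := pvValue data with hv
  set vtp := pvGroups data with hvtp
  have hkeys : vtp.keys = PySem.Set.ofList (data.keys.map v) := by
    rw [hvtp, pvGroups, PySem.Dict.keys_foldl_modify_key data.keys v ([] : List String)
      (fun _ name => (fun l => l ++ [name]))]
    simp [PySem.Set.update_nil_left]
  have hgroup : ∀ w : Int, vtp.getD w [] = data.keys.filter (fun n => v n == w) := by
    intro w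
    rw [hvtp, pvGroups, ← List.foldl_map (f := fun n => (v n, n))
      (g := fun (d : PySem.Dict Int (List String)) p => d.modify p.1 [] (fun l => l ++ [p.2])),
      PySem.Dict.getD_foldl_modify_append]
    simp [List.filter_map, List.map_map, Function.comp_def]
  set values := PySem.List.sorted vtp.keys (fun x => x) true with hvalues
  have hvalnd : values.Nodup :=
    ((PySem.List.sorted_perm vtp.keys (fun x => x) true).nodup_iff).mpr
      (hkeys ▸ PySem.Set.nodup_ofList _)
  have hvdesc : values.Pairwise (fun a b => b < a) := by
    have h1 : values.Pairwise (fun a b => b ≤ a) := PySem.List.sorted_pairwise_rev vtp.keys (fun x => x)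
    exact (h1.and hvalnd).imp (fun h => lt_of_le_of_ne h.1 (fun he => h.2 he.symm))
  have hcov : ∀ x ∈ data.keys, v x ∈ values := by
    intro x hx
    rw [hvalues, PySem.List.mem_sorted, hkeys, PySem.Set.mem_ofList]
    exact List.mem_map_of_mem hx
  have hmemval : ∀ w x, x ∈ vtp.getD w [] → v x = w := by
    intro w x hx
    rw [hgroup] at hx
    simpa using (List.mem_filter.mp hx).2
  have hgrpnd : ∀ w, (vtp.getD w []).Nodup := fun w => (hgroup w) ▸ hnd.filter _
  rw [PySem.List.foldl_append_eq_flatMap, List.nil_append]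
  set names := PySem.List.sorted data.keys (fun x => x) false with hnames
  -- both sides are pvOrd-pairwise
  have hApw : (values.flatMap (fun w => PySem.List.sorted (vtp.getD w []) (fun x => x) false)).Pairwise (pvOrd v) := by
    rw [List.pairwise_flatMap]
    constructor
    · intro w hw
      have hsnd : (PySem.List.sorted (vtp.getD w []) (fun x => x) false).Nodup :=
        ((PySem.List.sorted_perm _ _ _).nodup_iff).mpr (hgrpnd w)
      have hle : (PySem.List.sorted (vtp.getD w []) (fun x => x) false).Pairwise (· ≤ ·) :=
        PySem.List.sorted_pairwise _ _
      refine ((hle.and hsnd).imp_of_mem ?_)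
      intro a b ha hb h
      rw [PySem.List.mem_sorted] at ha hb
      exact Or.inr ⟨(hmemval w a ha).trans (hmemval w b hb).symm, lt_of_le_of_ne h.1 h.2⟩
    · refine hvdesc.imp_of_mem ?_
      intro w1 w2 _ _ h x hx y hy
      rw [PySem.List.mem_sorted] at hx hy
      exact Or.inl (by rw [hmemval w1 x hx, hmemval w2 y hy]; exact h)
  have hnamespw : names.Pairwise (· < ·) := by
    have h1 : names.Pairwise (· ≤ ·) := PySem.List.sorted_pairwise _ _
    have h2 : names.Nodup := ((PySem.List.sorted_perm _ _ _).nodup_iff).mpr hnd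
    exact (h1.and h2).imp (fun h => lt_of_le_of_ne h.1 h.2)
  have hBpw : (PySem.List.sorted names v true).Pairwise (pvOrd v) :=
    pvSorted_rev_pairwise v names hnamespw
  -- both sides are permutations of the key list
  have hAperm : (values.flatMap (fun w => PySem.List.sorted (vtp.getD w []) (fun x => x) false)).Perm data.keys := by
    refine (pvPerm_flatMap_congr values _ _ (fun w _ => PySem.List.sorted_perm _ _ _)).trans ?_
    rw [List.flatMap_congr (fun w _ => hgroup w)]
    exact pvPerm_flatMap_filter values data.keys v hvalnd hcov
  have hBperm : (PySem.List.sorted names v true).Perm data.keys :=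
    (PySem.List.sorted_perm names v true).trans (PySem.List.sorted_perm data.keys (fun x => x) false)
  exact List.Perm.eq_of_pairwise (fun a b _ _ h1 h2 => pvOrd_antisymm v a b h1 h2)
    hApw hBpw (hAperm.trans hBperm.symm)

-- ===== VERDICT (by name: the statement is the Claim_ definition above) =====
theorem get_sorted_product_name_list_spec : Claim_equal_get_sorted_product_name_list := by
  intro pd _ _
  unfold Spec_get_sorted_product_name_list
  unfold get_sorted_product_name_list get_sorted_product_name_list_alt
  simp only [pvStep_eq_modify]
  exact pvMain (PySem.Dict.ofList pd) (PySem.Dict.nodup_keys_ofList pd)
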